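-- pv_equiv track=rewrite | github.com/jduriu/yahtzee_cli | modules/game_functions.py | check_dice_format
-- ===== SOURCE A (Python) =====
-- def check_dice_format(user_input):
--     checked = []
--     if user_input:
--         dice = user_input.split(", ")
--         for die in dice:
--             if len(die) == 2 and die not in checked:
--                 if die[0] == "d" and die[1].isdigit():
--                     if int(die[1]) > 0 and int(die[1]) < 6:
--                         checked.append(die)
--         return len(dice) == len(checked)
-- ===== SOURCE B (Python) =====
-- BITS = {"d1": 1, "d2": 2, "d3": 4, "d4": 8, "d5": 16}
--
--
-- def check_dice_format(user_input):
--     if not user_input: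
--         return None
--     mask = 0
--     for die in user_input.split(", "):
--         bit = BITS.get(die)
--         if bit is None or mask & bit:
--             return False
--         mask |= bit
--     return True
-- ===== Notes on version B (the rewrite author's own statement) =====
-- stated objective: simpler
-- what changed: Replaces A's membership-guarded accumulator list and final length comparison by a table-driven single pass: each token is looked up in a fixed dict mapping the five valid dice to bit values, duplicates are detected with a bitmask, and the loop exits early on the first bad or repeated token.
import Mathlib
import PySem

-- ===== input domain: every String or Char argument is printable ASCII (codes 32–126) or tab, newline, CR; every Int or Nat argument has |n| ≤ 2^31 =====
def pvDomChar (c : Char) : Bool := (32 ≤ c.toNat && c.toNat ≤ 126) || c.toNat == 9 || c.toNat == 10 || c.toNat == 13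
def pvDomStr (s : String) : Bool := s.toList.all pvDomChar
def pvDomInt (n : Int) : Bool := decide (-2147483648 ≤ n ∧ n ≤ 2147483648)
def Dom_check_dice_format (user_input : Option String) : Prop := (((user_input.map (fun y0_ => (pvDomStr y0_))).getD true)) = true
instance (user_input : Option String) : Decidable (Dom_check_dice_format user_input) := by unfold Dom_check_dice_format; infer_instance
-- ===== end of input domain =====

-- B replaces A's membership-guarded 'checked' accumulator loop and final length comparison
-- by a table-driven single pass (fixed dict of the five valid dice → bit values, a duplicate
-- bitmask, early exit on the first bad or repeated token): simpler decomposition.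

-- ===== PORT A =====
-- step of A's for-loop over the 'checked' accumulator (nested ifs in the same order as A)
def pvAStep (checked : List (List Char)) (die : List Char) : List (List Char) :=
  if die.length = 2 ∧ die ∉ checked then
    if PySem.List.pyGetD die 0 ' ' = 'd' ∧ PySem.Chars.isdigit (PySem.List.pyGetD die 1 ' ') = true then
      if 0 < (PySem.Int.ofChars? [PySem.List.pyGetD die 1 ' ']).getD 0 ∧
         (PySem.Int.ofChars? [PySem.List.pyGetD die 1 ' ']).getD 0 < 6 then
        checked ++ [die]
      else checked
    else checked
  else checked

def check_dice_format (user_input : Option String) : Option Bool :=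
  match user_input with
  | none => none
  | some s =>
    if s.toList = [] then none
    else
      let dice := (PySem.Chars.split? s.toList (", ".toList)).getD []
      let checked := dice.foldl pvAStep []
      some (decide (dice.length = checked.length))

-- ===== PORT B =====
-- Source B's module-level BITS table: the five valid dice mapped to distinct bit values
def pvBits : PySem.Dict (List Char) Nat :=
  PySem.Dict.ofList [(['d','1'], 1), (['d','2'], 2), (['d','3'], 4), (['d','4'], 8), (['d','5'], 16)]

-- Source B's for-loop with early returns (mask is a small nonnegative Python int, exact as Nat;
-- 'bit = BITS.get(die); if bit is None or mask & bit: return False' is the match + if)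
def pvMaskLoop (mask : Nat) : List (List Char) → Bool
  | [] => true
  | die :: rest =>
    match PySem.Dict.get? pvBits die with
    | none => false
    | some bit => if mask &&& bit ≠ 0 then false else pvMaskLoop (mask ||| bit) rest

def check_dice_format_alt (user_input : Option String) : Option Bool :=
  match user_input with
  | none => none
  | some s =>
    if s.toList = [] then none
    else some (pvMaskLoop 0 ((PySem.Chars.split? s.toList (", ".toList)).getD []))

-- ===== PRECONDITION & SPEC =====
def Spec_check_dice_format (user_input : Option String) (out : Option Bool) : Prop := out = check_dice_format_alt user_input
instance (user_input : Option String) (out : Option Bool) : Decidable (Spec_check_dice_format user_input out) := by unfold Spec_check_dice_format; infer_instance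

-- ===== CLAIM (what is proved, stated in full; the proofs are below) =====
def Claim_equal_check_dice_format : Prop := ∀ (user_input : Option String), Dom_check_dice_format user_input → Spec_check_dice_format user_input (check_dice_format user_input)

-- ===== LEMMAS AND PROOFS =====

-- the five tokens accepted by A's nested conditions / listed in B's table
def pvTokens : List (List Char) := [['d','1'], ['d','2'], ['d','3'], ['d','4'], ['d','5']]

-- A's nested conditions on one token, as a predicate
def pvValid (d : List Char) : Bool :=
  decide (d.length = 2) &&
  (PySem.List.pyGetD d 0 ' ' == 'd') &&
  PySem.Chars.isdigit (PySem.List.pyGetD d 1 ' ') &&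
  decide (0 < (PySem.Int.ofChars? [PySem.List.pyGetD d 1 ' ']).getD 0) &&
  decide ((PySem.Int.ofChars? [PySem.List.pyGetD d 1 ' ']).getD 0 < 6)

def pvBit (d : List Char) : Nat := (PySem.Dict.get? pvBits d).getD 0

theorem pv_or_eq_zero (a b : Nat) : a ||| b = 0 ↔ a = 0 ∧ b = 0 := by
  constructor
  · intro h
    refine ⟨Nat.eq_of_testBit_eq fun i => ?_, Nat.eq_of_testBit_eq fun i => ?_⟩ <;>
      (have h2 := congrArg (fun n => n.testBit i) h;
       simp only [Nat.testBit_or, Nat.zero_testBit, Bool.or_eq_false_iff] at h2;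
       simp [h2.1, h2.2, Nat.zero_testBit])
  · rintro ⟨rfl, rfl⟩; rfl

-- an ASCII digit character is one of the ten literals
theorem pvChar_cases (b : Char) (h : PySem.Chars.isdigit b = true) :
    b = '0' ∨ b = '1' ∨ b = '2' ∨ b = '3' ∨ b = '4' ∨
    b = '5' ∨ b = '6' ∨ b = '7' ∨ b = '8' ∨ b = '9' := by
  simp only [PySem.Chars.isdigit, Bool.and_eq_true, decide_eq_true_eq] at h
  obtain ⟨h1, h2⟩ := h
  rw [Char.le_def, UInt32.le_iff_toNat_le] at h1 h2
  have hb : ∀ n : Nat, b.val.toNat = n → ∀ c : Char, c.val.toNat = n → b = c :=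
    fun n hn c hc => Char.ext (UInt32.toNat_inj.mp (hn.trans hc.symm))
  have h48 : (48 : Nat) ≤ b.val.toNat := h1
  have h57 : b.val.toNat ≤ 57 := h2
  rcases (by omega :
      b.val.toNat = 48 ∨ b.val.toNat = 49 ∨ b.val.toNat = 50 ∨ b.val.toNat = 51 ∨
      b.val.toNat = 52 ∨ b.val.toNat = 53 ∨ b.val.toNat = 54 ∨ b.val.toNat = 55 ∨
      b.val.toNat = 56 ∨ b.val.toNat = 57) with h|h|h|h|h|h|h|h|h|h
  · exact Or.inl (hb _ h '0' (by decide))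
  · exact Or.inr (Or.inl (hb _ h '1' (by decide)))
  · exact Or.inr (Or.inr (Or.inl (hb _ h '2' (by decide))))
  · exact Or.inr (Or.inr (Or.inr (Or.inl (hb _ h '3' (by decide)))))
  · exact Or.inr (Or.inr (Or.inr (Or.inr (Or.inl (hb _ h '4' (by decide))))))
  · exact Or.inr (Or.inr (Or.inr (Or.inr (Or.inr (Or.inl (hb _ h '5' (by decide)))))))
  · exact Or.inr (Or.inr (Or.inr (Or.inr (Or.inr (Or.inr (Or.inl (hb _ h '6' (by decide))))))))
  · exact Or.inr (Or.inr (Or.inr (Or.inr (Or.inr (Or.inr (Or.inr (Or.inl (hb _ h '7' (by decide)))))))))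
  · exact Or.inr (Or.inr (Or.inr (Or.inr (Or.inr (Or.inr (Or.inr (Or.inr (Or.inl (hb _ h '8' (by decide))))))))))
  · exact Or.inr (Or.inr (Or.inr (Or.inr (Or.inr (Or.inr (Or.inr (Or.inr (Or.inr (hb _ h '9' (by decide))))))))))

-- A's per-token conditions accept exactly the five table tokens
theorem pvValid_iff (d : List Char) : pvValid d = true ↔ d ∈ pvTokens := by
  constructor
  · intro h
    match d with
    | [] => simp [pvValid] at h
    | [_] => simp [pvValid] at h
    | _ :: _ :: _ :: _ => simp [pvValid] at h
    | [a, b] =>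
      have g0 : PySem.List.pyGetD [a, b] 0 ' ' = a := rfl
      have g1 : PySem.List.pyGetD [a, b] 1 ' ' = b := rfl
      simp only [pvValid, g0, g1, Bool.and_eq_true, beq_iff_eq, decide_eq_true_eq] at h
      obtain ⟨⟨⟨⟨_, ha⟩, hdig⟩, hlo⟩, hhi⟩ := h
      subst ha
      rcases pvChar_cases b hdig with rfl|rfl|rfl|rfl|rfl|rfl|rfl|rfl|rfl|rfl
      · exact absurd hlo (by decide)
      · decide
      · decide
      · decide
      · decide
      · decide
      · exact absurd hhi (by decide)
      · exact absurd hhi (by decide)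
      · exact absurd hhi (by decide)
      · exact absurd hhi (by decide)
  · intro h; fin_cases h <;> decide

theorem pvKeys : pvBits.keys = pvTokens := by decide

theorem pvGet_none (d : List Char) : PySem.Dict.get? pvBits d = none ↔ d ∉ pvTokens := by
  rw [PySem.Dict.get?_eq_none_iff_not_mem_keys, pvKeys]

-- the bit values of two valid tokens share a set bit exactly when the tokens coincide
theorem pvBit_and (d d' : List Char) (hd : d ∈ pvTokens) (hd' : d' ∈ pvTokens) :
    pvBit d &&& pvBit d' = 0 ↔ d ≠ d' := by
  fin_cases hd <;> fin_cases hd' <;> decide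

-- B's loop succeeds iff every token is in the table, no token repeats,
-- and no token's bit is already set in the incoming mask
theorem pvMaskLoop_iff (dice : List (List Char)) : ∀ mask : Nat,
    pvMaskLoop mask dice = true ↔
      (∀ d ∈ dice, d ∈ pvTokens) ∧ dice.Nodup ∧ (∀ d ∈ dice, mask &&& pvBit d = 0) := by
  induction dice with
  | nil => intro mask; simp [pvMaskLoop]
  | cons d rest ih =>
    intro mask
    rcases hg : PySem.Dict.get? pvBits d with _ | bit
    · have hstep : pvMaskLoop mask (d :: rest) = false := by simp [pvMaskLoop, hg]
      rw [hstep]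
      simp only [Bool.false_eq_true, false_iff]
      rintro ⟨hT, -, -⟩
      exact (pvGet_none d).mp hg (hT d List.mem_cons_self)
    · have hdT : d ∈ pvTokens := by
        by_contra hc
        rw [← pvGet_none d] at hc
        rw [hg] at hc
        exact Option.some_ne_none bit hc
      have hbit : pvBit d = bit := by simp [pvBit, hg]
      by_cases h0 : mask &&& bit = 0
      · have hstep : pvMaskLoop mask (d :: rest) = pvMaskLoop (mask ||| bit) rest := by
          simp [pvMaskLoop, hg, h0]
        rw [hstep, ih (mask ||| bit)]
        constructor
        · rintro ⟨hT, hnd, hm⟩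
          refine ⟨?_, ⟨List.nodup_cons.mpr ⟨?_, hnd⟩, ?_⟩⟩
          · intro d' hd'
            rcases List.mem_cons.mp hd' with rfl | hd'
            · exact hdT
            · exact hT d' hd'
          · intro hmem
            have h2 := hm d hmem
            rw [Nat.and_or_distrib_right, pv_or_eq_zero, ← hbit] at h2
            exact ((pvBit_and d d hdT hdT).mp h2.2) rfl
          · intro d' hd'
            rcases List.mem_cons.mp hd' with rfl | hd'
            · rw [hbit]; exact h0
            · have h2 := hm d' hd'
              rw [Nat.and_or_distrib_right, pv_or_eq_zero] at h2
              exact h2.1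
        · rintro ⟨hT, hnd, hm⟩
          obtain ⟨hdm, hndr⟩ := List.nodup_cons.mp hnd
          refine ⟨fun d' hd' => hT d' (List.mem_cons_of_mem d hd'), hndr, ?_⟩
          intro d' hd'
          rw [Nat.and_or_distrib_right, pv_or_eq_zero, ← hbit]
          refine ⟨hm d' (List.mem_cons_of_mem d hd'), ?_⟩
          exact (pvBit_and d d' hdT (hT d' (List.mem_cons_of_mem d hd'))).mpr
            (fun he => hdm (he ▸ hd'))
      · have hstep : pvMaskLoop mask (d :: rest) = false := by simp [pvMaskLoop, hg, h0]
        rw [hstep]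
        simp only [Bool.false_eq_true, false_iff]
        rintro ⟨-, -, hm⟩
        exact h0 (hbit ▸ hm d List.mem_cons_self)

-- a list whose deduplication keeps its full length has no duplicates
theorem pv_nodup_of_ofList_length {α : Type} [BEq α] [LawfulBEq α] (l : List α)
    (h : (PySem.Set.ofList l).length = l.length) : l.Nodup := by
  induction l with
  | nil => exact List.nodup_nil
  | cons x xs ih =>
    rw [PySem.Set.ofList_cons] at h
    simp only [List.length_cons] at h
    have hle1 : ((PySem.Set.ofList xs).discard x).length ≤ (PySem.Set.ofList xs).length :=
      List.length_filter_le _ _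
    have hle2 : (PySem.Set.ofList xs).length ≤ xs.length := PySem.Set.length_ofList_le xs
    have hdl : ((PySem.Set.ofList xs).discard x).length = (PySem.Set.ofList xs).length ∧
        (PySem.Set.ofList xs).length = xs.length := by omega
    have hd1 : (List.filter (fun y => !(y == x)) (PySem.Set.ofList xs)).length =
        (PySem.Set.ofList xs).length := hdl.1
    have hall := List.length_filter_eq_length_iff.mp hd1
    refine List.nodup_cons.mpr ⟨fun hx => ?_, ih hdl.2⟩
    have := hall x ((PySem.Set.mem_ofList _ _).mpr hx)
    simp at this

-- A's loop body equals "add to the set if valid"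
theorem pvAStep_eq (checked : List (List Char)) (die : List Char) :
    pvAStep checked die = if pvValid die then PySem.Set.add checked die else checked := by
  unfold pvAStep pvValid
  rw [PySem.Set.add_eq_ite]
  by_cases h1 : die.length = 2 <;>
  by_cases h2 : die ∈ checked <;>
  by_cases h3 : PySem.List.pyGetD die 0 ' ' = 'd' <;>
  by_cases h4 : PySem.Chars.isdigit (PySem.List.pyGetD die 1 ' ') = true <;>
  by_cases h5 : 0 < (PySem.Int.ofChars? [PySem.List.pyGetD die 1 ' ']).getD 0 <;>
  by_cases h6 : (PySem.Int.ofChars? [PySem.List.pyGetD die 1 ' ']).getD 0 < 6 <;>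
  simp [h1, h2, h3, h4, h5, h6]

-- A's whole loop equals folding Set.add over the valid dice
theorem pvLoop_eq (l : List (List Char)) (checked : List (List Char)) :
    l.foldl pvAStep checked = (l.filter pvValid).foldl PySem.Set.add checked := by
  induction l generalizing checked with
  | nil => rfl
  | cons x xs ih =>
    simp only [List.foldl_cons, pvAStep_eq, List.filter_cons]
    by_cases h : pvValid x = true
    · simp [h, ih]
    · simp [h, ih]

-- the two final answers agree: A's count comparison equals B's masked scan
theorem pvFinal (dice : List (List Char)) :
    decide (dice.length = (PySem.Set.ofList (dice.filter pvValid)).length) =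
      pvMaskLoop 0 dice := by
  rw [Bool.eq_iff_iff, decide_eq_true_eq, pvMaskLoop_iff]
  constructor
  · intro h
    have h1 : (PySem.Set.ofList (dice.filter pvValid)).length ≤ (dice.filter pvValid).length :=
      PySem.Set.length_ofList_le _
    have h2 : (dice.filter pvValid).length ≤ dice.length := dice.length_filter_le _
    have hfl : (dice.filter pvValid).length = dice.length := by omega
    have hall := List.length_filter_eq_length_iff.mp hfl
    have hf : dice.filter pvValid = dice := List.filter_eq_self.mpr hall
    rw [hf] at h
    exact ⟨fun d hd => (pvValid_iff d).mp (hall d hd),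
      pv_nodup_of_ofList_length dice h.symm,
      fun d _ => Nat.zero_and _⟩
  · rintro ⟨hT, hnd, -⟩
    have hall : ∀ d ∈ dice, pvValid d = true := fun d hd => (pvValid_iff d).mpr (hT d hd)
    rw [List.filter_eq_self.mpr hall, PySem.Set.ofList_eq_self_of_nodup dice hnd]

-- ===== VERDICT (by name: the statement is the Claim_ definition above) =====
theorem check_dice_format_spec : Claim_equal_check_dice_format := by
  intro user_input _
  unfold Spec_check_dice_format check_dice_format check_dice_format_alt
  match user_input with
  | none => rfl
  | some s =>
    by_cases hs : s.toList = []
    · simp [hs]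
    · simp only [hs, if_false]
      congr 1
      rw [pvLoop_eq, ← PySem.Set.ofList_eq_foldl, pvFinal]
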